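-- pv_equiv track=rewrite | github.com/mindspore-ai/mindspore | tests/ut/python/parallel/parallel_end_to_end/matmul/_test_matmul_parallel_4p.py | list_to_id
-- ===== SOURCE A (Python) =====
-- def list_to_id(id_list, shape):
--     result = 0
--     for i in range(0, len(id_list)):
--         v = 1
--         for j in range(i+1, len(id_list)):
--             v = v*shape[j]
--         result = result + id_list[i]*v
--     return result
-- ===== SOURCE B (Python) =====
-- def list_to_id(id_list, shape):
--     result = 0
--     mult = 1
--     for idx, s in zip(reversed(id_list), reversed(shape[:len(id_list)])):
--         result += idx * mult
--         mult *= s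
--     return result
-- ===== Notes on version B (the rewrite author's own statement) =====
-- stated objective: faster
-- what changed: Replaces the nested loop that recomputes the suffix product of shape from scratch for every index with a single backward pass over the reversed (index, extent) pairs maintaining a running multiplier.
-- outside the precondition, e.g. on list_to_id([5], []): A returns 5, B returns 0
import Mathlib
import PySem

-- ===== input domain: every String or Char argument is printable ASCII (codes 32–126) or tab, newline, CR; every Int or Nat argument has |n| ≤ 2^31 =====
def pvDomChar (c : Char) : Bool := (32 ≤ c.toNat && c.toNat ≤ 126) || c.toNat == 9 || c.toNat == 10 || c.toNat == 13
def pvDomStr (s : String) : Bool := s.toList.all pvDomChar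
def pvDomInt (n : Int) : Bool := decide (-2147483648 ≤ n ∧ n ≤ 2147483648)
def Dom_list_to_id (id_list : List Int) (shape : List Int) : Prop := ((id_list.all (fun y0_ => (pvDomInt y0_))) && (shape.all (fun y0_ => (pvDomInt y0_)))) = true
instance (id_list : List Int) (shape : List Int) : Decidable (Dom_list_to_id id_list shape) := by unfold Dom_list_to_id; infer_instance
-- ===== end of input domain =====

-- B replaces A's nested loop (which recomputes the suffix product of shape for every index)
-- by a single backward pass keeping a running multiplier; measured asymptotically faster (O(n) vs O(n^2)).


-- ===== PORT A =====
def list_to_id (id_list : List Int) (shape : List Int) : Int :=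
  (PySem.List.pyRange 0 (id_list.length : Int) 1).foldl
    (fun result i =>
      let v := (PySem.List.pyRange (i + 1) (id_list.length : Int) 1).foldl
        (fun v j => v * PySem.List.pyGetD shape j 0) 1
      result + PySem.List.pyGetD id_list i 0 * v)
    0

-- ===== PORT B =====
def list_to_id_alt (id_list : List Int) (shape : List Int) : Int :=
  let pairs := id_list.reverse.zip ((PySem.List.slice shape none (some (id_list.length : Int))).reverse)
  (pairs.foldl (fun rm p => (rm.1 + p.1 * rm.2, rm.2 * p.2)) ((0 : Int), (1 : Int))).1

-- ===== PRECONDITION & SPEC =====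
-- Pre_ excludes inputs with more indices than shape has dimensions: on those A raises IndexError,
-- except in the degenerate one-index case, where the value A returns ignores shape entirely.
def Pre_list_to_id (id_list : List Int) (shape : List Int) : Prop :=
  id_list.length ≤ shape.length
instance (id_list : List Int) (shape : List Int) : Decidable (Pre_list_to_id id_list shape) := by unfold Pre_list_to_id; infer_instance

def pvWitness_list_to_id : List Int × List Int := ([1, 2], [3, 4])

def Spec_list_to_id (id_list : List Int) (shape : List Int) (out : Int) : Prop := out = list_to_id_alt id_list shape
instance (id_list : List Int) (shape : List Int) (out : Int) : Decidable (Spec_list_to_id id_list shape out) := by unfold Spec_list_to_id; infer_instance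

-- ===== CLAIM (what is proved, stated in full; the proofs are below) =====
def Claim_equal_list_to_id : Prop := ∀ (id_list : List Int) (shape : List Int), Dom_list_to_id id_list shape → Pre_list_to_id id_list shape → Spec_list_to_id id_list shape (list_to_id id_list shape)

-- ===== LEMMAS AND PROOFS =====

-- the common recursive specification: Σᵢ idᵢ · Π_{j>i} shapeⱼ over equal-length lists
def specSum : List Int → List Int → Int
  | a :: as, _ :: ts => a * ts.prod + specSum as ts
  | _, _ => 0

theorem foldl_mul_map (l : List Int) (f : Int → Int) :
    ∀ a : Int, l.foldl (fun v x => v * f x) a = a * (l.map f).prod := by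
  induction l with
  | nil => intro a; simp
  | cons x xs ih => intro a; simp [List.foldl_cons, ih]; ring

theorem zip_reverse_eq {α β : Type} :
    ∀ (as : List α) (bs : List β), as.length = bs.length →
      as.reverse.zip bs.reverse = (as.zip bs).reverse := by
  intro as
  induction as with
  | nil => intro bs h; simp at h; simp [List.length_eq_zero_iff.mp h.symm]
  | cons a as ih =>
    intro bs h
    cases bs with
    | nil => simp at h
    | cons b ts =>
      simp only [List.length_cons, Nat.succ.injEq] at h
      simp only [List.reverse_cons, List.zip_cons_cons, List.reverse_cons]
      rw [List.zip_append (by simp [h]), ih ts h]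
      simp

theorem foldr_zip_spec :
    ∀ (as ts : List Int), ts.length = as.length →
      (as.zip ts).foldr (fun p rm => (rm.1 + p.1 * rm.2, rm.2 * p.2)) ((0 : Int), (1 : Int))
        = (specSum as ts, ts.prod) := by
  intro as
  induction as with
  | nil => intro ts h; simp at h; simp [h, specSum]
  | cons a as ih =>
    intro ts h
    cases ts with
    | nil => simp at h
    | cons s ts =>
      simp only [List.length_cons, Nat.succ.injEq] at h
      simp [List.zip_cons_cons, List.foldr_cons, ih ts h, specSum]
      constructor <;> ring

theorem range_sum_spec :
    ∀ (as ts : List Int), ts.length = as.length →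
      ((List.range as.length).map (fun k => as.getD k 0 * (ts.drop (k + 1)).prod)).sum
        = specSum as ts := by
  intro as
  induction as with
  | nil => intro ts h; simp [specSum]
  | cons a as ih =>
    intro ts h
    cases ts with
    | nil => simp at h
    | cons s ts =>
      simp only [List.length_cons, Nat.succ.injEq] at h
      rw [show (a :: as).length = as.length + 1 from rfl, List.range_succ_eq_map]
      simp only [List.map_cons, List.map_map, List.sum_cons, Function.comp_def,
        List.getD_cons_zero, List.getD_cons_succ, List.drop_succ_cons]
      rw [ih ts h]
      simp [specSum]

theorem list_to_id_eq_spec (id_list shape : List Int) (hpre : id_list.length ≤ shape.length) :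
    list_to_id id_list shape = specSum id_list (shape.take id_list.length) := by
  unfold list_to_id
  rw [PySem.List.foldl_add (g := fun i => PySem.List.pyGetD id_list i 0 *
    ((PySem.List.pyRange (i + 1) (id_list.length : Int) 1).foldl
      (fun v j => v * PySem.List.pyGetD shape j 0) 1))]
  rw [PySem.List.pyRange_zero_natCast, List.map_map]
  simp only [Function.comp_def, foldl_mul_map, one_mul, PySem.List.pyGetD_natCast]
  rw [zero_add]
  have ht : (shape.take id_list.length).length = id_list.length := by
    simp [List.length_take]; omega
  have hterm : ∀ x ∈ List.range id_list.length,
      id_list.getD x 0 *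
        (List.map (fun j => PySem.List.pyGetD shape j 0)
          (PySem.List.pyRange ((x : Int) + 1) (id_list.length : Int))).prod
      = id_list.getD x 0 * ((shape.take id_list.length).drop (x + 1)).prod := by
    intro x _
    have hcong : List.map (fun j => PySem.List.pyGetD shape j 0)
        (PySem.List.pyRange ((x : Int) + 1) (id_list.length : Int))
        = List.map (fun j => PySem.List.pyGetD (shape.take id_list.length) j 0)
        (PySem.List.pyRange ((x : Int) + 1) (id_list.length : Int)) := by
      apply List.map_congr_left
      intro j hj
      obtain ⟨hj1, hj2⟩ := PySem.List.mem_pyRange_one.mp hj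
      have h0 : (0 : Int) ≤ j := by omega
      rw [PySem.List.pyGetD_of_nonneg shape 0 h0, PySem.List.pyGetD_of_nonneg _ 0 h0]
      have hlt : j.toNat < id_list.length := by omega
      simp [List.getD, hlt]
    rw [hcong,
      show ((id_list.length : Int)) = ((shape.take id_list.length).length : Int) by rw [ht],
      PySem.List.map_pyGetD_pyRange' _ 0 (by positivity)]
    norm_num
  rw [List.map_congr_left hterm, range_sum_spec id_list (shape.take id_list.length) ht]

theorem list_to_id_alt_eq_spec (id_list shape : List Int) (hpre : id_list.length ≤ shape.length) :
    list_to_id_alt id_list shape = specSum id_list (shape.take id_list.length) := by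
  have ht : (shape.take id_list.length).length = id_list.length := by
    simp [List.length_take]; omega
  unfold list_to_id_alt
  simp only []
  rw [PySem.List.slice_to_natCast]
  rw [zip_reverse_eq id_list (shape.take id_list.length) ht.symm]
  rw [List.foldl_reverse]
  rw [foldr_zip_spec id_list (shape.take id_list.length) ht]

-- ===== VERDICT (by name: the statement is the Claim_ definition above) =====
theorem list_to_id_spec : Claim_equal_list_to_id := by
  intro id_list shape _ hpre
  unfold Spec_list_to_id
  rw [list_to_id_eq_spec id_list shape hpre, list_to_id_alt_eq_spec id_list shape hpre]
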